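-- pv_equiv track=rewrite | github.com/MayroseLab/CristaScripts | CRISTA_online/targets_pa.py | count_consecutive_inconsistencies
-- ===== SOURCE A (Python) =====
-- def count_consecutive_inconsistencies(aligned_sgRNA, aligned_offtarget):
-- 	cnt = 0
-- 	current_cnt = 0
--
-- 	for i in range(len(aligned_offtarget) - 3):
-- 		if aligned_offtarget[i] != aligned_sgRNA[i]:
-- 			current_cnt += 1
-- 		else:
-- 			cnt += current_cnt > 0
-- 			current_cnt = 0
-- 	return cnt
-- ===== SOURCE B (Python) =====
-- def count_consecutive_inconsistencies(aligned_sgRNA, aligned_offtarget):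
-- 	# mismatch profile of the scanned region, then count True->False transitions
-- 	# (a mismatch run only counts once it is terminated by a match)
-- 	m = [aligned_offtarget[i] != aligned_sgRNA[i] for i in range(len(aligned_offtarget) - 3)]
-- 	return sum(1 for i in range(len(m) - 1) if m[i] and not m[i + 1])
-- ===== Notes on version B (the rewrite author's own statement) =====
-- stated objective: simpler
-- what changed: Replaces the stateful run-counter loop by building the mismatch boolean profile once and counting True-to-False transitions in it with a generator expression.
import Mathlib
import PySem

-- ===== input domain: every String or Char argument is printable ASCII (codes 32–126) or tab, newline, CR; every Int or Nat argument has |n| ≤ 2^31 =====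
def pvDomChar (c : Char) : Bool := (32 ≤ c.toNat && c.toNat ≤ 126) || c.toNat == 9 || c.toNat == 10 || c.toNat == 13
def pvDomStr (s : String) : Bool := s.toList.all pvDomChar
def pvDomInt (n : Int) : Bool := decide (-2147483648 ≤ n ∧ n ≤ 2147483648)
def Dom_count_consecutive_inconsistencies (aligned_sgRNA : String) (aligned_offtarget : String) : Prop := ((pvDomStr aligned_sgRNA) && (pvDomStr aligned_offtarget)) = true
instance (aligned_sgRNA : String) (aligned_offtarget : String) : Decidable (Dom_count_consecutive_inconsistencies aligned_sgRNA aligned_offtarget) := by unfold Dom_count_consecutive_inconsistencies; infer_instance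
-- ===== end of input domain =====

-- B builds the mismatch boolean profile once and counts True→False transitions in it,
-- replacing A's stateful run-counter loop (objective: simpler).

-- ===== PORT A =====
-- literal port of A's loop: state (cnt, current_cnt); pyGet? is s[i] (none = IndexError,
-- excluded by Pre_; under Pre_ both option values are `some` and compare like the chars)
def count_consecutive_inconsistencies (aligned_sgRNA : String) (aligned_offtarget : String) : Int :=
  ((PySem.List.pyRange 0 (PySem.Str.len aligned_offtarget - 3) 1).foldl
    (fun (st : Int × Int) i =>
      if PySem.Str.pyGet? aligned_offtarget i ≠ PySem.Str.pyGet? aligned_sgRNA i then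
        (st.1, st.2 + 1)
      else
        (st.1 + (if st.2 > 0 then 1 else 0), 0))
    (0, 0)).1

-- ===== PORT B =====
-- literal port of Source B: mismatch profile m, then count i with m[i] and not m[i+1]
def count_consecutive_inconsistencies_alt (aligned_sgRNA : String) (aligned_offtarget : String) : Int :=
  let m : List Bool := (PySem.List.pyRange 0 (PySem.Str.len aligned_offtarget - 3) 1).map
    (fun i => decide (PySem.Str.pyGet? aligned_offtarget i ≠ PySem.Str.pyGet? aligned_sgRNA i))
  (PySem.List.pyRange 0 ((m.length : Int) - 1) 1).foldl
    (fun acc i =>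
      if PySem.List.pyGetD m i false = true ∧ PySem.List.pyGetD m (i + 1) false = false then
        acc + 1
      else acc) 0

-- ===== PRECONDITION & SPEC =====
-- Pre_ excludes exactly the inputs where Python A raises IndexError (scanned region longer
-- than aligned_sgRNA); Python B raises there too.
def Pre_count_consecutive_inconsistencies (aligned_sgRNA : String) (aligned_offtarget : String) : Prop :=
  PySem.Str.len aligned_offtarget - 3 ≤ PySem.Str.len aligned_sgRNA
instance (aligned_sgRNA : String) (aligned_offtarget : String) : Decidable (Pre_count_consecutive_inconsistencies aligned_sgRNA aligned_offtarget) := by unfold Pre_count_consecutive_inconsistencies; infer_instance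

def pvWitness_count_consecutive_inconsistencies : String × String := ("ACGTACG", "ACCTTCGAGT")

def Spec_count_consecutive_inconsistencies (aligned_sgRNA : String) (aligned_offtarget : String) (out : Int) : Prop := out = count_consecutive_inconsistencies_alt aligned_sgRNA aligned_offtarget
instance (aligned_sgRNA : String) (aligned_offtarget : String) (out : Int) : Decidable (Spec_count_consecutive_inconsistencies aligned_sgRNA aligned_offtarget out) := by unfold Spec_count_consecutive_inconsistencies; infer_instance

-- ===== CLAIM (what is proved, stated in full; the proofs are below) =====
def Claim_equal_count_consecutive_inconsistencies : Prop := ∀ (aligned_sgRNA : String) (aligned_offtarget : String), Dom_count_consecutive_inconsistencies aligned_sgRNA aligned_offtarget → Pre_count_consecutive_inconsistencies aligned_sgRNA aligned_offtarget → Spec_count_consecutive_inconsistencies aligned_sgRNA aligned_offtarget (count_consecutive_inconsistencies aligned_sgRNA aligned_offtarget)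

-- ===== LEMMAS AND PROOFS =====

-- A's loop body as a step over the mismatch bit
def pvStep (st : Int × Int) (b : Bool) : Int × Int :=
  if b then (st.1, st.2 + 1) else (st.1 + (if st.2 > 0 then 1 else 0), 0)

-- transitions count with explicit previous bit
def pvG (p : Bool) : List Bool → Int
  | [] => 0
  | b :: bs => (if p && !b then 1 else 0) + pvG b bs

-- adjacent True→False transitions
def pvH : List Bool → Int
  | [] => 0
  | [_] => 0
  | a :: b :: bs => (if a && !b then 1 else 0) + pvH (b :: bs)

theorem pvFoldA (bs : List Bool) (cnt cur : Int) (h : 0 ≤ cur) :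
    (bs.foldl pvStep (cnt, cur)).1 = cnt + pvG (decide (0 < cur)) bs := by
  induction bs generalizing cnt cur with
  | nil => simp [pvG]
  | cons b bs ih =>
    cases b with
    | true =>
      have hs : pvStep (cnt, cur) true = (cnt, cur + 1) := by simp [pvStep]
      rw [List.foldl_cons, hs, ih cnt (cur + 1) (by omega)]
      simp [pvG, show (0 : Int) < cur + 1 by omega]
    | false =>
      have hs : pvStep (cnt, cur) false = (cnt + (if cur > 0 then 1 else 0), 0) := by
        simp [pvStep]
      rw [List.foldl_cons, hs, ih _ 0 le_rfl]
      simp only [pvG]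
      by_cases hc : 0 < cur <;> simp [hc, add_assoc]

theorem pvH_cons (b : Bool) (bs : List Bool) :
    pvH (b :: bs) = (if b && !(bs.headD true) then 1 else 0) + pvH bs := by
  cases bs <;> simp [pvH]

theorem pvG_eq (p : Bool) (bs : List Bool) :
    pvG p bs = (if p && !(bs.headD true) then 1 else 0) + pvH bs := by
  induction bs generalizing p with
  | nil => simp [pvG, pvH]
  | cons b bs ih =>
    rw [pvG, ih b, pvH_cons]
    simp only [List.headD_cons]
    ring

theorem pvCountH (bs : List Bool) :
    ((List.range (bs.length - 1)).countP
      (fun k => bs.getD k false && !bs.getD (k + 1) false) : Int) = pvH bs := by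
  induction bs with
  | nil => simp [pvH]
  | cons a bs ih =>
    cases bs with
    | nil => simp [pvH]
    | cons b cs =>
      rw [show (a :: b :: cs).length - 1 = (b :: cs).length - 1 + 1 by simp,
          List.range_succ_eq_map, List.countP_cons, List.countP_map]
      have harg :
          ((fun k => (a :: b :: cs).getD k false && !(a :: b :: cs).getD (k + 1) false) ∘ Nat.succ)
          = (fun k => (b :: cs).getD k false && !(b :: cs).getD (k + 1) false) := by
        funext k; simp
      rw [harg]
      push_cast
      rw [ih, pvH]
      cases a <;> cases b <;> simp <;> ring

theorem pvCountB (bs : List Bool) :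
    (PySem.List.pyRange 0 ((bs.length : Int) - 1) 1).foldl
      (fun acc i =>
        if PySem.List.pyGetD bs i false = true ∧ PySem.List.pyGetD bs (i + 1) false = false then
          acc + 1
        else acc) 0 = pvH bs := by
  rw [PySem.List.pyRange_zero, List.foldl_map]
  have hlen : ((bs.length : Int) - 1).toNat = bs.length - 1 := by omega
  have hfun : (fun (acc : Int) (k : Nat) =>
      if PySem.List.pyGetD bs (k : Int) false = true ∧ PySem.List.pyGetD bs ((k : Int) + 1) false = false then
        acc + 1
      else acc)
      = (fun (acc : Int) (k : Nat) =>
          if (bs.getD k false && !bs.getD (k + 1) false) = true then acc + 1 else acc) := by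
    funext acc k
    have h2 : ((k : Int) + 1) = ((k + 1 : Nat) : Int) := by push_cast; ring
    rw [PySem.List.pyGetD_natCast, h2, PySem.List.pyGetD_natCast]
    by_cases hb : bs.getD k false <;> by_cases hc : bs.getD (k + 1) false <;> simp [hc]
  rw [hlen, hfun, PySem.List.foldl_count_if, pvCountH]
  ring

theorem count_consecutive_inconsistencies_eq_alt (sg off : String) :
    count_consecutive_inconsistencies sg off = count_consecutive_inconsistencies_alt sg off := by
  set n : Int := PySem.Str.len off - 3 with hn
  set M : List Bool := (PySem.List.pyRange 0 n 1).map
    (fun i => decide (PySem.Str.pyGet? off i ≠ PySem.Str.pyGet? sg i)) with hM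
  have hstep : (fun (st : Int × Int) i =>
      if PySem.Str.pyGet? off i ≠ PySem.Str.pyGet? sg i then
        (st.1, st.2 + 1)
      else
        (st.1 + (if st.2 > 0 then 1 else 0), 0))
      = (fun (st : Int × Int) i =>
          pvStep st (decide (PySem.Str.pyGet? off i ≠ PySem.Str.pyGet? sg i))) := by
    funext st i
    by_cases h : PySem.Str.pyGet? off i ≠ PySem.Str.pyGet? sg i <;> simp [pvStep]
  have hA : count_consecutive_inconsistencies sg off = (M.foldl pvStep (0, 0)).1 := by
    unfold count_consecutive_inconsistencies
    rw [hM, List.foldl_map, hstep]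
  have hB : count_consecutive_inconsistencies_alt sg off = pvH M := by
    unfold count_consecutive_inconsistencies_alt
    exact pvCountB M
  rw [hA, hB, pvFoldA M 0 0 le_rfl, pvG_eq]
  simp

-- ===== VERDICT (by name: the statement is the Claim_ definition above) =====
theorem count_consecutive_inconsistencies_spec : Claim_equal_count_consecutive_inconsistencies := by
  intro sg off _ _
  unfold Spec_count_consecutive_inconsistencies
  exact count_consecutive_inconsistencies_eq_alt sg off
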